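-- pv_equiv track=rewrite | github.com/Hamilton-College/old-Shaker-Manifesto | image_files.py | ind_info
-- ===== SOURCE A (Python) =====
-- def ind_info(text):
-- 	article = 1
-- 	string_out = ""
-- 	counter = 0
-- 	# Loops through text to catch all types in a div tag
-- 	for i in range(0, len(text)):
-- 		if counter > 0:
-- 			counter -= 1
-- 		elif article == 1 and text[i:i+8] == "level1=\"":
-- 			article = 21
-- 			counter = 7
-- 		elif article == 21 and text[i] == "\"":
-- 			break
-- 		elif article == 21:
-- 			string_out += text[i]
-- 	return string_out
-- ===== SOURCE B (Python) =====
-- def ind_info(text):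
--     idx = text.find('level1="')
--     if idx == -1:
--         return ""
--     start = idx + 8
--     end = text.find('"', start)
--     if end == -1:
--         return text[start:]
--     return text[start:end]
-- ===== Notes on version B (the rewrite author's own statement) =====
-- stated objective: faster
-- what changed: Replaces the per-character state machine (article flag, countdown counter, char-by-char accumulation) with two str.find calls and one slice.
import Mathlib
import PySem

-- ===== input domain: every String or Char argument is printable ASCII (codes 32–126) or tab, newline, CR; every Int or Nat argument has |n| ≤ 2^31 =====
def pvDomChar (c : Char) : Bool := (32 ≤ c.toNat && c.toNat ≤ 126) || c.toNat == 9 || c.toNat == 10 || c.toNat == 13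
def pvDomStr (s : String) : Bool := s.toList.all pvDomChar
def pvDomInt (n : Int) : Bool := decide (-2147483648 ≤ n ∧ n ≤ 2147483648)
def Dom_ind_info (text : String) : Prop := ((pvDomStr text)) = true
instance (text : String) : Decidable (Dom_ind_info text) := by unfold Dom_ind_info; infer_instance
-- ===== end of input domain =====

-- B replaces A's per-character state machine (article flag, countdown counter) with two find calls and one slice; same return value.

-- ===== PORT A =====
-- the for-loop over range(len(text)) with state (article, string_out, counter); 'break' returns out
def indLoop (cs : List Char) (i : Nat) (article : Int) (out : List Char) (counter : Int) : List Char :=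
  if h : i < cs.length then
    if counter > 0 then indLoop cs (i+1) article out (counter - 1)
    else if article = 1 ∧ PySem.List.slice cs (some (i:Int)) (some ((i:Int)+8)) = "level1=\"".toList then
      indLoop cs (i+1) 21 out 7
    else if article = 21 ∧ cs[i] = '"' then out
    else if article = 21 then indLoop cs (i+1) article (out ++ [cs[i]]) counter
    else indLoop cs (i+1) article out counter
  else out
termination_by cs.length - i

def ind_info (text : String) : String := String.ofList (indLoop text.toList 0 1 [] 0)

-- ===== PORT B =====
def ind_info_alt (text : String) : String :=
  let idx := PySem.Str.find text "level1=\""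
  if idx = -1 then ""
  else
    let start := idx + 8
    let e := PySem.Str.findFrom text "\"" start
    if e = -1 then PySem.Str.slice text (some start) none
    else PySem.Str.slice text (some start) (some e)

-- ===== PRECONDITION & SPEC =====
def Spec_ind_info (text : String) (out : String) : Prop := out = ind_info_alt text
instance (text : String) (out : String) : Decidable (Spec_ind_info text out) := by unfold Spec_ind_info; infer_instance

-- ===== CLAIM (what is proved, stated in full; the proofs are below) =====
def Claim_equal_ind_info : Prop := ∀ (text : String), Dom_ind_info text → Spec_ind_info text (ind_info text)

-- ===== LEMMAS AND PROOFS =====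

-- find returns 0 when the substring is a prefix
theorem pv_find_of_prefix (s sub : List Char) (h : sub <+: s) :
    PySem.Chars.find s sub = 0 := by
  have hinf : sub <:+: s := h.isInfix
  have h0 : 0 ≤ PySem.Chars.find s sub := (PySem.Chars.find_nonneg_iff s sub).mpr hinf
  have hspec := PySem.Chars.find_spec h0
  by_contra hne
  have hpos : 0 < (PySem.Chars.find s sub).toNat := by omega
  exact hspec.2 0 hpos (by simpa using h)

-- find on a cons when no occurrence starts at the head
theorem pv_find_tail (c : Char) (t sub : List Char) (h : ¬ sub <+: c :: t) :
    PySem.Chars.find (c :: t) sub =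
      if PySem.Chars.find t sub = -1 then -1 else 1 + PySem.Chars.find t sub := by
  by_cases hft : PySem.Chars.find t sub = -1
  · rw [if_pos hft]
    rw [PySem.Chars.find_eq_neg_one_iff] at hft ⊢
    rw [List.infix_cons_iff]
    tauto
  · rw [if_neg hft]
    have hf0 : 0 ≤ PySem.Chars.find t sub := by
      have := PySem.Chars.neg_one_le_find t sub; omega
    have hst := PySem.Chars.find_spec hf0
    have hinf : sub <:+: c :: t :=
      List.infix_cons_iff.mpr (Or.inr ((PySem.Chars.find_nonneg_iff t sub).mp hf0))
    have hg0 : 0 ≤ PySem.Chars.find (c :: t) sub :=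
      (PySem.Chars.find_nonneg_iff (c :: t) sub).mpr hinf
    have hsg := PySem.Chars.find_spec hg0
    set g := PySem.Chars.find (c :: t) sub with hgdef
    set f := PySem.Chars.find t sub with hfdef
    -- g.toNat ≥ 1
    have hg1 : 1 ≤ g.toNat := by
      by_contra h0
      have : g.toNat = 0 := by omega
      rw [this] at hsg
      exact h (by simpa using hsg.1)
    -- f.toNat ≤ g.toNat - 1
    have hdropg : (c :: t).drop g.toNat = t.drop (g.toNat - 1) := by
      have hg : g.toNat = (g.toNat - 1) + 1 := by omega
      rw [hg, List.drop_succ_cons]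
      congr 1
    have hle1 : f.toNat ≤ g.toNat - 1 := by
      by_contra hlt
      exact hst.2 (g.toNat - 1) (by omega) (hdropg ▸ hsg.1)
    -- g.toNat ≤ f.toNat + 1
    have hle2 : g.toNat ≤ f.toNat + 1 := by
      by_contra hlt
      exact hsg.2 (f.toNat + 1) (by omega) (by simpa [List.drop_succ_cons] using hst.1)
    omega

-- takeWhile-until-a-char through find of the one-char substring
theorem pv_takeWhile_find (l : List Char) (q : Char) :
    l.takeWhile (fun ch => ch ≠ q) =
      if PySem.Chars.find l [q] = -1 then l else l.take (PySem.Chars.find l [q]).toNat := by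
  induction l with
  | nil =>
    have : PySem.Chars.find ([] : List Char) [q] = -1 := by
      rw [PySem.Chars.find_eq_neg_one_iff]
      intro hinf
      simpa using hinf.length_le
    simp [this]
  | cons c t ih =>
    by_cases hc : c = q
    · subst hc
      have hp : [c] <+: c :: t := by simp
      rw [pv_find_of_prefix _ _ hp]
      simp
    · have hnp : ¬ [q] <+: c :: t := by
        intro hp
        rcases hp with ⟨r, hr⟩
        simp at hr
        exact hc hr.1.symm
      rw [pv_find_tail c t [q] hnp]
      by_cases hft : PySem.Chars.find t [q] = -1
      · have hteq : List.takeWhile (fun ch => decide (ch ≠ q)) t = t := by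
          rw [ih, if_pos hft]
        rw [if_pos hft, if_pos rfl, List.takeWhile_cons, if_pos (by simp [hc]), hteq]
      · have hf0 : 0 ≤ PySem.Chars.find t [q] := by
          have := PySem.Chars.neg_one_le_find t [q]; omega
        have hne : ¬ (1 + PySem.Chars.find t [q] = -1) := by omega
        have htn : (1 + PySem.Chars.find t [q]).toNat = (PySem.Chars.find t [q]).toNat + 1 := by
          omega
        have hteq : List.takeWhile (fun ch => decide (ch ≠ q)) t
            = List.take (PySem.Chars.find t [q]).toNat t := by
          rw [ih, if_neg hft]
        rw [if_neg hft, if_neg hne, htn, List.take_succ_cons, List.takeWhile_cons,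
            if_pos (by simp [hc]), hteq]

-- collecting phase: article = 21, skip `counter` characters then take until the quote
theorem pv_collect (n : Nat) : ∀ (cs : List Char) (i : Nat) (out : List Char) (c : Int),
    0 ≤ c → cs.length ≤ i + n →
    indLoop cs i 21 out c = out ++ (cs.drop (i + c.toNat)).takeWhile (fun ch => ch ≠ '"') := by
  induction n with
  | zero =>
    intro cs i out c hc hn
    rw [indLoop]
    rw [dif_neg (by omega)]
    rw [List.drop_eq_nil_of_le (by omega)]
    simp
  | succ n ih =>
    intro cs i out c hc hn
    rw [indLoop]
    by_cases h : i < cs.length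
    · rw [dif_pos h]
      by_cases hcpos : c > 0
      · rw [if_pos hcpos, ih cs (i+1) out (c-1) (by omega) (by omega)]
        have : i + 1 + (c - 1).toNat = i + c.toNat := by omega
        rw [this]
      · have hc0 : c = 0 := by omega
        subst hc0
        rw [if_neg hcpos, if_neg (by simp)]
        simp only [Int.toNat_zero, Nat.add_zero]
        by_cases hq : cs[i] = '"'
        · rw [if_pos ⟨by trivial, hq⟩, List.drop_eq_getElem_cons h]
          simp [hq]
        · rw [if_neg (by simp [hq]), if_pos (by trivial),
              ih cs (i+1) (out ++ [cs[i]]) 0 (by omega) (by omega),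
              List.drop_eq_getElem_cons h]
          simp only [Int.toNat_zero, Nat.add_zero]
          rw [List.takeWhile_cons, if_pos (by simp [hq])]
          simp
    · rw [dif_neg h]
      rw [List.drop_eq_nil_of_le (by omega)]
      simp

-- scanning phase: article = 1 behaves like find of the marker
theorem pv_scan (n : Nat) : ∀ (cs : List Char) (i : Nat), cs.length ≤ i + n →
    indLoop cs i 1 [] 0 =
      if PySem.Chars.find (cs.drop i) ("level1=\"".toList) = -1 then []
      else (cs.drop (i + (PySem.Chars.find (cs.drop i) ("level1=\"".toList)).toNat + 8)).takeWhile
        (fun ch => ch ≠ '\"') := by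
  induction n with
  | zero =>
    intro cs i hn
    rw [indLoop, dif_neg (by omega), List.drop_eq_nil_of_le (by omega)]
    have hnil : PySem.Chars.find ([] : List Char) ("level1=\"".toList) = -1 := by
      rw [PySem.Chars.find_eq_neg_one_iff]
      intro hinf
      simpa using hinf.length_le
    rw [if_pos hnil]
  | succ n ih =>
    intro cs i hn
    rw [indLoop]
    by_cases h : i < cs.length
    · rw [dif_pos h, if_neg (by omega)]
      have hMlen : ("level1=\"".toList).length = 8 := by decide
      have hslice : PySem.List.slice cs (some (i:Int)) (some ((i:Int)+8)) = (cs.drop i).take 8 := by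
        have h8 : ((i:Int) + 8) = ((i + 8 : Nat) : Int) := by push_cast; ring
        rw [h8, PySem.List.slice_natCast]
        congr 1
        omega
      by_cases hm : ("level1=\"".toList) <+: cs.drop i
      · have hcond : PySem.List.slice cs (some (i:Int)) (some ((i:Int)+8)) = "level1=\"".toList := by
          rw [hslice, ← hMlen]
          exact (List.prefix_iff_eq_take.mp hm).symm
        rw [if_pos ⟨rfl, hcond⟩,
            pv_collect (cs.length) cs (i+1) [] 7 (by omega) (by omega),
            pv_find_of_prefix _ _ hm]
        rw [if_neg (by omega : ¬ ((0 : Int) = -1))]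
        have h7 : i + 1 + (7 : Int).toNat = i + (0 : Int).toNat + 8 := by omega
        rw [h7, List.nil_append]
      · have hcond : ¬ (PySem.List.slice cs (some (i:Int)) (some ((i:Int)+8)) = "level1=\"".toList) := by
          rw [hslice]
          intro heq
          exact hm (List.prefix_iff_eq_take.mpr (by rw [hMlen]; exact heq.symm))
        rw [if_neg (fun hAnd => hcond hAnd.2), if_neg (by simp), if_neg (by simp),
            ih cs (i+1) (by omega)]
        have hd : cs.drop i = cs[i] :: cs.drop (i+1) := List.drop_eq_getElem_cons h
        rw [hd] at hm ⊢
        rw [pv_find_tail cs[i] (cs.drop (i+1)) _ hm]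
        by_cases hft : PySem.Chars.find (cs.drop (i+1)) ("level1=\"".toList) = -1
        · rw [if_pos hft, if_pos hft]
          simp
        · have hf0 : 0 ≤ PySem.Chars.find (cs.drop (i+1)) ("level1=\"".toList) := by
            have := PySem.Chars.neg_one_le_find (cs.drop (i+1)) ("level1=\"".toList); omega
          have hne : ¬ (1 + PySem.Chars.find (cs.drop (i+1)) ("level1=\"".toList) = -1) := by omega
          rw [if_neg hft, if_neg hft, if_neg hne]
          have harith : i + (1 + PySem.Chars.find (cs.drop (i+1)) ("level1=\"".toList)).toNat + 8
               = i + 1 + (PySem.Chars.find (cs.drop (i+1)) ("level1=\"".toList)).toNat + 8 := by omega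
          rw [harith]
    · rw [dif_neg h, List.drop_eq_nil_of_le (by omega)]
      have hnil : PySem.Chars.find ([] : List Char) ("level1=\"".toList) = -1 := by
        rw [PySem.Chars.find_eq_neg_one_iff]
        intro hinf
        simpa using hinf.length_le
      rw [if_pos hnil]

-- ===== VERDICT (by name: the statement is the Claim_ definition above) =====
theorem ind_info_spec : Claim_equal_ind_info := by
  intro text _
  unfold Spec_ind_info ind_info ind_info_alt
  set cs := text.toList with hcs
  rw [pv_scan cs.length cs 0 (by omega)]
  simp only [List.drop_zero]
  rw [PySem.Str.find_eq, ← hcs]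
  set M := "level1=\"".toList with hM
  by_cases hf : PySem.Chars.find cs M = -1
  · rw [if_pos hf, if_pos hf]
  · rw [if_neg hf, if_neg hf]
    have hf0 : 0 ≤ PySem.Chars.find cs M := by
      have := PySem.Chars.neg_one_le_find cs M; omega
    set f := PySem.Chars.find cs M with hfdef
    have hspec := PySem.Chars.find_spec hf0
    have hlen : f.toNat + 8 ≤ cs.length := by
      have h1 := hspec.1.length_le
      have h2 : M.length = 8 := by rw [hM]; decide
      simp only [List.length_drop, h2] at h1
      omega
    have hcast : f + 8 = ((f.toNat + 8 : Nat) : Int) := by omega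
    rw [hcast]
    set k := f.toNat + 8 with hk
    rw [PySem.Str.findFrom_eq, ← hcs, PySem.Chars.findFrom_natCast cs _ k hlen]
    have hq : ("\"".toList) = ['\"'] := by decide
    rw [hq]
    have hzero : 0 + f.toNat + 8 = k := by omega
    rw [hzero, pv_takeWhile_find (cs.drop k) '\"']
    by_cases he : PySem.Chars.find (cs.drop k) ['\"'] = -1
    · rw [if_pos he, if_pos he, if_pos rfl]
      rw [← String.ofList_toList (s := PySem.Str.slice text (some (k : Int)) none)]
      congr 1
      rw [PySem.Str.toList_slice, PySem.Chars.slice_eq_listSlice, ← hcs,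
          PySem.List.slice_from_natCast]
    · rw [if_neg he, if_neg he]
      have he0 : 0 ≤ PySem.Chars.find (cs.drop k) ['\"'] := by
        have := PySem.Chars.neg_one_le_find (cs.drop k) ['\"']; omega
      have hne : ¬ ((k : Int) + PySem.Chars.find (cs.drop k) ['\"'] = -1) := by omega
      rw [if_neg hne]
      rw [← String.ofList_toList
            (s := PySem.Str.slice text (some (k : Int)) (some ((k : Int) + PySem.Chars.find (cs.drop k) ['\"'])))]
      congr 1
      rw [PySem.Str.toList_slice, PySem.Chars.slice_eq_listSlice, ← hcs,
          PySem.List.slice_toNat cs (by omega) (by omega)]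
      have h1 : ((k : Int) + PySem.Chars.find (cs.drop k) ['\"']).toNat - ((k : Nat) : Int).toNat
              = (PySem.Chars.find (cs.drop k) ['\"']).toNat := by omega
      have h2 : (((k : Nat) : Int)).toNat = k := by omega
      rw [h1, h2]
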